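-- pv_equiv track=rewrite | github.com/WALM-DC/WebTools | AktionspreisFixer/CreateStoffList.py | build_stoff_index
-- ===== SOURCE A (Python) =====
-- from typing import Dict, List, Tuple, Optional, Any
--
-- def norm(s: Any) -> str:
--     return str(s or "").strip()
--
-- def low(s: Any) -> str:
--     return norm(s).lower()
--
-- def build_stoff_index(stoff_list: List[Dict[str, str]]):
--     """
--     Index by (modell_lower, stoff_lower) -> list of stoff rows
--     (supplier matching is done afterwards)
--     """
--     idx: Dict[Tuple[str, str], List[Dict[str, str]]] = {}
--     for s in stoff_list:
--         key = (low(s.get("modell")), low(s.get("stoff")))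
--         if key == ("", ""):
--             continue
--         idx.setdefault(key, []).append(s)
--     return idx
-- ===== SOURCE B (Python) =====
-- from typing import Dict, List, Tuple, Optional, Any
--
-- def norm(s: Any) -> str:
--     return str(s or "").strip()
--
-- def low(s: Any) -> str:
--     return norm(s).lower()
--
-- def _key_of(s):
--     return (low(s.get("modell")), low(s.get("stoff")))
--
-- def build_stoff_index(stoff_list):
--     # Two-pass decomposition: first collect the distinct non-empty keys in
--     # first-occurrence order, then build each group by filtering the whole list.
--     keys = []
--     for s in stoff_list:
--         k = _key_of(s)
--         if k != ("", "") and k not in keys: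
--             keys.append(k)
--     return {k: [s for s in stoff_list if _key_of(s) == k] for k in keys}
-- ===== Notes on version B (the rewrite author's own statement) =====
-- stated objective: alternative
-- what changed: Replaced the single-pass dict setdefault/append accumulation by a two-pass decomposition: one pass collects the distinct non-empty keys in first-occurrence order, then each group is produced by filtering the whole list per key.
import Mathlib
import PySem

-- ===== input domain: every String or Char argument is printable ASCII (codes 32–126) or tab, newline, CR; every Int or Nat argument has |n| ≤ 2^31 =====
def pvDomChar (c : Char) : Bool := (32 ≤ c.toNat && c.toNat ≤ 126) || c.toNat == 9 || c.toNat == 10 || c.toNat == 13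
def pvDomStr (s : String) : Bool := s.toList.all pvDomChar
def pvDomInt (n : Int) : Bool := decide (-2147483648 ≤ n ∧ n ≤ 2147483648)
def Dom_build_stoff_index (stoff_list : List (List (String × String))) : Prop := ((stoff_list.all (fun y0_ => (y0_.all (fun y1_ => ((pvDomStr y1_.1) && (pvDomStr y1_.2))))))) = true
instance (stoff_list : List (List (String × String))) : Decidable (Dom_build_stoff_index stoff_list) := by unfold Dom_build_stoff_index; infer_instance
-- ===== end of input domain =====

-- B replaces A's single-pass dict accumulation by a two-pass sort-free grouping
-- (collect distinct non-empty keys in first-occurrence order, then filter per key);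
-- objective: alternative decomposition, same return value.

-- ===== PORT A =====
-- low(s) = str(s or "").strip().lower(); argument is Optional[str] (dict .get)
def pvLow (o : Option String) : String := PySem.Str.lower (PySem.Str.strip (o.getD ""))

def build_stoff_index (stoff_list : List (List (String × String))) : List (String × String × List (List (String × String))) :=
  (stoff_list.foldl
    (fun (idx : PySem.Dict (String × String) (List (List (String × String)))) s =>
      let key := (pvLow ((PySem.Dict.mk s).get? "modell"), pvLow ((PySem.Dict.mk s).get? "stoff"))
      if key = ("", "") then idx
      else idx.modify key [] (fun v => v ++ [s]))   -- idx.setdefault(key, []).append(s)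
    PySem.Dict.empty).items.map (fun kv => (kv.1.1, kv.1.2, kv.2))

-- ===== PORT B =====
def pvKeyOf (s : List (String × String)) : String × String :=
  (pvLow ((PySem.Dict.mk s).get? "modell"), pvLow ((PySem.Dict.mk s).get? "stoff"))

def build_stoff_index_alt (stoff_list : List (List (String × String))) : List (String × String × List (List (String × String))) :=
  let keys := stoff_list.foldl
    (fun (ks : List (String × String)) s =>
      let k := pvKeyOf s
      if k ≠ ("", "") ∧ k ∉ ks then ks ++ [k] else ks) []
  keys.map (fun k => (k.1, k.2, stoff_list.filter (fun s => decide (pvKeyOf s = k))))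

-- ===== PRECONDITION & SPEC =====
def Spec_build_stoff_index (stoff_list : List (List (String × String))) (out : List (String × String × List (List (String × String)))) : Prop := out = build_stoff_index_alt stoff_list
instance (stoff_list : List (List (String × String))) (out : List (String × String × List (List (String × String)))) : Decidable (Spec_build_stoff_index stoff_list out) := by unfold Spec_build_stoff_index; infer_instance

-- ===== CLAIM (what is proved, stated in full; the proofs are below) =====
def Claim_equal_build_stoff_index : Prop := ∀ (stoff_list : List (List (String × String))), Dom_build_stoff_index stoff_list → Spec_build_stoff_index stoff_list (build_stoff_index stoff_list)

-- ===== LEMMAS AND PROOFS =====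

-- A's loop body and B's key-collecting loop body, named for the proofs
def stepA (idx : PySem.Dict (String × String) (List (List (String × String)))) (s : List (String × String)) : PySem.Dict (String × String) (List (List (String × String))) :=
  if pvKeyOf s = ("", "") then idx else idx.modify (pvKeyOf s) [] (fun v => v ++ [s])

def stepK (ks : List (String × String)) (s : List (String × String)) : List (String × String) :=
  if pvKeyOf s ≠ ("", "") ∧ pvKeyOf s ∉ ks then ks ++ [pvKeyOf s] else ks

lemma portA_unfold (l : List (List (String × String))) :
    build_stoff_index l = (l.foldl stepA PySem.Dict.empty).items.map (fun kv => (kv.1.1, kv.1.2, kv.2)) := rfl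

lemma portB_unfold (l : List (List (String × String))) :
    build_stoff_index_alt l = (l.foldl stepK []).map (fun k => (k.1, k.2, l.filter (fun s => decide (pvKeyOf s = k)))) := rfl

lemma mem_foldK {k : String × String} (l : List (List (String × String))) (ks : List (String × String)) (h : k ∈ ks) : k ∈ l.foldl stepK ks := by
  induction l generalizing ks with
  | nil => exact h
  | cons a t ih =>
    simp only [List.foldl_cons]
    apply ih
    unfold stepK
    split
    · exact List.mem_append_left _ h
    · exact h

lemma foldK_not_empty (l : List (List (String × String))) (ks : List (String × String)) (h : ("", "") ∉ ks) : ("", "") ∉ l.foldl stepK ks := by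
  induction l generalizing ks with
  | nil => exact h
  | cons a t ih =>
    simp only [List.foldl_cons]
    apply ih
    unfold stepK
    split
    · rename_i hc
      intro hm
      rcases List.mem_append.1 hm with hm | hm
      · exact h hm
      · exact hc.1 (List.mem_singleton.1 hm).symm
    · exact h

lemma foldK_nodup (l : List (List (String × String))) (ks : List (String × String)) (h : ks.Nodup) : (l.foldl stepK ks).Nodup := by
  induction l generalizing ks with
  | nil => exact h
  | cons a t ih =>
    simp only [List.foldl_cons]
    apply ih
    unfold stepK
    split
    · rename_i hc
      rw [List.nodup_append]
      refine ⟨h, List.nodup_singleton _, ?_⟩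
      intro x hx y hy
      rw [List.mem_singleton] at hy
      subst hy
      exact fun he => hc.2 (he ▸ hx)
    · exact h

lemma mem_foldK_of_row {s : List (String × String)} (l : List (List (String × String))) (ks : List (String × String)) (hs : s ∈ l) (hne : pvKeyOf s ≠ ("", "")) : pvKeyOf s ∈ l.foldl stepK ks := by
  induction l generalizing ks with
  | nil => cases hs
  | cons a t ih =>
    simp only [List.foldl_cons]
    rcases List.mem_cons.1 hs with rfl | hs'
    · apply mem_foldK
      by_cases hm : pvKeyOf s ∈ ks
      · unfold stepK
        split
        · exact List.mem_append_left _ hm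
        · exact hm
      · unfold stepK
        rw [if_pos ⟨hne, hm⟩]
        exact List.mem_append_right _ (List.mem_singleton.2 rfl)
    · exact ih _ hs'

lemma filter_eq_nil_of_not_mem {k : String × String} (l : List (List (String × String))) (hk : k ≠ ("", "")) (hnm : k ∉ l.foldl stepK []) :
    l.filter (fun s => decide (pvKeyOf s = k)) = [] := by
  rw [List.filter_eq_nil_iff]
  intro s hs
  simp only [decide_eq_true_eq]
  intro hkey
  exact hnm (hkey ▸ mem_foldK_of_row l [] hs (hkey.symm ▸ hk))

-- the Dict built from a keys-to-values map: contains / getD / insert, on the representation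
lemma contains_mapDict (ks : List (String × String)) (f : String × String → List (List (String × String))) (k : String × String) :
    (PySem.Dict.mk (ks.map fun k' => (k', f k'))).contains k = decide (k ∈ ks) := by
  rw [PySem.Dict.contains_eq_decide_mem_keys]
  simp [PySem.Dict.keys, List.map_map, Function.comp_def]

lemma getD_mapDict (ks : List (String × String)) (f : String × String → List (List (String × String))) (k : String × String)
    (hk : k ∈ ks) (hnd : ks.Nodup) :
    (PySem.Dict.mk (ks.map fun k' => (k', f k'))).getD k [] = f k := by
  apply PySem.Dict.getD_of_mem_items
  · exact List.mem_map.2 ⟨k, hk, rfl⟩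
  · simpa [PySem.Dict.keys, List.map_map, Function.comp_def] using hnd

lemma insert_mapDict_of_mem (ks : List (String × String)) (f : String × String → List (List (String × String))) (k : String × String)
    (v : List (List (String × String))) (hk : k ∈ ks) :
    (PySem.Dict.mk (ks.map fun k' => (k', f k'))).insert k v
      = PySem.Dict.mk (ks.map fun k' => (k', if k' = k then v else f k')) := by
  unfold PySem.Dict.insert
  rw [contains_mapDict]
  simp only [hk, decide_true, if_true, List.map_map]
  congr 1
  apply List.map_congr_left
  intro k' _
  by_cases h : k' = k <;> simp [h, Function.comp]

lemma insert_mapDict_of_not_mem (ks : List (String × String)) (f : String × String → List (List (String × String))) (k : String × String)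
    (v : List (List (String × String))) (hk : k ∉ ks) :
    (PySem.Dict.mk (ks.map fun k' => (k', f k'))).insert k v
      = PySem.Dict.mk (ks.map (fun k' => (k', f k')) ++ [(k, v)]) := by
  unfold PySem.Dict.insert
  rw [contains_mapDict]
  simp [hk]

lemma main_invariant (l : List (List (String × String))) :
    (l.foldl stepA PySem.Dict.empty).items
      = (l.foldl stepK []).map (fun k => (k, l.filter (fun s => decide (pvKeyOf s = k)))) := by
  induction l using List.reverseRecOn with
  | nil => rfl
  | append_singleton l s ih =>
    rw [List.foldl_append, List.foldl_append]
    simp only [List.foldl_cons, List.foldl_nil]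
    have hfilter : ∀ k : String × String,
        (l ++ [s]).filter (fun s' => decide (pvKeyOf s' = k))
          = l.filter (fun s' => decide (pvKeyOf s' = k)) ++ (if pvKeyOf s = k then [s] else []) := by
      intro k
      rw [List.filter_append]
      by_cases h : pvKeyOf s = k <;> simp [h]
    by_cases hk : pvKeyOf s = ("", "")
    · -- row skipped by both
      have hA : stepA (l.foldl stepA PySem.Dict.empty) s = l.foldl stepA PySem.Dict.empty := if_pos hk
      have hK : stepK (l.foldl stepK []) s = l.foldl stepK [] := if_neg (fun hco => hco.1 hk)
      rw [hA, hK, ih]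
      apply List.map_congr_left
      intro k' hk'
      have hne : k' ≠ ("", "") := fun h => foldK_not_empty l [] (by simp) (h ▸ hk')
      have hne' : pvKeyOf s ≠ k' := by rw [hk]; exact fun h => hne h.symm
      rw [hfilter k', if_neg hne']
      simp
    · have hA : stepA (l.foldl stepA PySem.Dict.empty) s
          = (l.foldl stepA PySem.Dict.empty).modify (pvKeyOf s) [] (fun v => v ++ [s]) := if_neg hk
      have hnd : (l.foldl stepK []).Nodup := foldK_nodup l [] (by simp)
      have hD : l.foldl stepA PySem.Dict.empty
          = PySem.Dict.mk ((l.foldl stepK []).map (fun k => (k, l.filter (fun s' => decide (pvKeyOf s' = k))))) := by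
        apply PySem.Dict.ext; exact ih
      by_cases hmem : pvKeyOf s ∈ l.foldl stepK []
      · -- existing key: value extended in place, key list unchanged
        have hK : stepK (l.foldl stepK []) s = l.foldl stepK [] := if_neg (fun hco => hco.2 hmem)
        rw [hA, hK, hD]
        simp only [PySem.Dict.modify]
        rw [getD_mapDict _ _ _ hmem hnd, insert_mapDict_of_mem _ _ _ _ hmem]
        apply List.map_congr_left
        intro k' hk'
        rw [hfilter k']
        rcases eq_or_ne k' (pvKeyOf s) with rfl | h
        · simp
        · simp [h, Ne.symm h]
      · -- new key: appended at the end with the singleton group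
        have hK : stepK (l.foldl stepK []) s = l.foldl stepK [] ++ [pvKeyOf s] := if_pos ⟨hk, hmem⟩
        rw [hA, hK, hD]
        simp only [PySem.Dict.modify]
        have hc : (PySem.Dict.mk ((l.foldl stepK []).map
            (fun k => (k, l.filter (fun s' => decide (pvKeyOf s' = k)))))).contains (pvKeyOf s) = false := by
          rw [contains_mapDict]; simp [hmem]
        rw [PySem.Dict.getD_of_not_contains _ [] hc, insert_mapDict_of_not_mem _ _ _ _ hmem]
        have h1 : (l.foldl stepK []).map (fun k' => (k', (l ++ [s]).filter (fun s' => decide (pvKeyOf s' = k'))))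
            = (l.foldl stepK []).map (fun k' => (k', l.filter (fun s' => decide (pvKeyOf s' = k')))) := by
          apply List.map_congr_left
          intro k' hk'
          rw [hfilter k', if_neg (fun h : pvKeyOf s = k' => hmem (by rw [h]; exact hk'))]
          simp
        have h2 : (l ++ [s]).filter (fun s' => decide (pvKeyOf s' = pvKeyOf s)) = [s] := by
          rw [hfilter (pvKeyOf s), if_pos rfl, filter_eq_nil_of_not_mem l hk hmem]
          simp
        simp only [List.map_append, List.map_cons, List.map_nil]
        rw [h1, h2]
        rfl

-- ===== VERDICT (by name: the statement is the Claim_ definition above) =====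
theorem build_stoff_index_spec : Claim_equal_build_stoff_index := by
  intro l _
  unfold Spec_build_stoff_index
  rw [portA_unfold, portB_unfold, main_invariant, List.map_map]
  rfl
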